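-- pv_equiv track=rewrite | github.com/Who7F/Leetcode_I_am_a_fish_bundle | 0228 Summary Ranges/py3three.py | chunkBy
-- ===== SOURCE A (Python) =====
-- def chunkBy(nums):
--     temp = [nums[0]]
--     anc = []
--
--     for i in range(len(nums) - 1):
--
--         if nums[i] + 1 != nums[i + 1]:
--             anc.append(temp)
--             temp = []
--         temp.append(nums[i + 1])
--
--     anc.append(temp)
--
--     return anc
-- ===== SOURCE B (Python) =====
-- def chunkBy(nums):
--     rev = []  # runs in reverse order, each run reversed
--     for x in reversed(nums):
--         if rev and x + 1 == rev[-1][-1]: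
--             rev[-1].append(x)
--         else:
--             rev.append([x])
--     return [run[::-1] for run in reversed(rev)]
-- ===== Notes on version B (the rewrite author's own statement) =====
-- stated objective: alternative
-- what changed: B traverses nums backwards, building each run reversed and the run list in reverse order by appending, then reverses everything at the end; A scans forward over range(len(nums)-1) with index pairs and a temp/anc accumulator.
-- outside the precondition, e.g. on chunkBy([]): A raises IndexError, B returns []
import Mathlib
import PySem

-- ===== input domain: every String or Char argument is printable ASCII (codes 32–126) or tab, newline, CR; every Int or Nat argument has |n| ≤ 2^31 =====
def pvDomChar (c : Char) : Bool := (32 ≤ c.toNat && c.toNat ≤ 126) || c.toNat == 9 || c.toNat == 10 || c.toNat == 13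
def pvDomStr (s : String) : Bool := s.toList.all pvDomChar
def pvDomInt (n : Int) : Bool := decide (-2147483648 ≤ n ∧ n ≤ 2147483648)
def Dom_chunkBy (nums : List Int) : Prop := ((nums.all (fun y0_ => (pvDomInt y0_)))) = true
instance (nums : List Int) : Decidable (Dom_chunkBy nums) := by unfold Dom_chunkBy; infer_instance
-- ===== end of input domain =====

-- B builds the runs back-to-front in one pass over the reversed list, then reverses everything; A scans forward with index pairs (alternative decomposition; same cost).

-- ===== PORT A =====
-- A's loop body: maybe close temp into anc, then append nums[i+1] to temp.
def chunkByStepA (nums : List Int) (st : List Int × List (List Int)) (i : Int) :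
    List Int × List (List Int) :=
  let st' := if PySem.List.pyGetD nums i 0 + 1 ≠ PySem.List.pyGetD nums (i + 1) 0
    then (([] : List Int), st.2 ++ [st.1]) else st
  (st'.1 ++ [PySem.List.pyGetD nums (i + 1) 0], st'.2)

def chunkBy (nums : List Int) : List (List Int) :=
  match nums with
  | [] => []   -- Python raises IndexError at nums[0]; excluded by Pre_chunkBy
  | x :: _ =>
    let st := (PySem.List.pyRange 0 ((nums.length : Int) - 1) 1).foldl (chunkByStepA nums) ([x], [])
    st.2 ++ [st.1]

-- ===== PORT B =====
-- Source B's loop body: extend the most recent reversed run, or append a new one.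
-- `run.getLastD 0`: Source B's rev[-1][-1]; runs are never empty, so the default is never read.
def chunkByStepB (rev : List (List Int)) (x : Int) : List (List Int) :=
  match rev.getLast? with
  | some run => if x + 1 = run.getLastD 0 then rev.dropLast ++ [run ++ [x]] else rev ++ [[x]]
  | none => rev ++ [[x]]

-- run[::-1] on a list is List.reverse (exact).
def chunkBy_alt (nums : List Int) : List (List Int) :=
  ((nums.reverse.foldl chunkByStepB []).reverse).map List.reverse

-- ===== PRECONDITION & SPEC =====
-- Pre_ excludes only the empty list, where Python A raises IndexError (nums[0]); B returns [] there.
def Pre_chunkBy (nums : List Int) : Prop := nums ≠ []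
instance (nums : List Int) : Decidable (Pre_chunkBy nums) := by unfold Pre_chunkBy; infer_instance
def pvWitness_chunkBy : List Int := [1, 2, 4]

def Spec_chunkBy (nums : List Int) (out : List (List Int)) : Prop := out = chunkBy_alt nums
instance (nums : List Int) (out : List (List Int)) : Decidable (Spec_chunkBy nums out) := by unfold Spec_chunkBy; infer_instance

-- ===== CLAIM (what is proved, stated in full; the proofs are below) =====
def Claim_equal_chunkBy : Prop := ∀ (nums : List Int), Dom_chunkBy nums → Pre_chunkBy nums → Spec_chunkBy nums (chunkBy nums)

-- ===== LEMMAS AND PROOFS =====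

-- Prepend-style one-step builder (proof-only): B's step seen through the final
-- double reversal — extend the head chunk on the left or open a new head chunk.
def prependStep (res : List (List Int)) (x : Int) : List (List Int) :=
  match res with
  | (y :: ys) :: rest => if x + 1 = y then (x :: y :: ys) :: rest else [x] :: (y :: ys) :: rest
  | _ => [x] :: res

-- The final double reversal of B, as a function of the loop state.
def phi (rev : List (List Int)) : List (List Int) := (rev.reverse).map List.reverse

theorem phi_step (rev : List (List Int)) (x : Int) (h : ∀ r ∈ rev, r ≠ []) :
    phi (chunkByStepB rev x) = prependStep (phi rev) x := by
  rcases List.eq_nil_or_concat rev with hrev | ⟨rs, run, hrev⟩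
  · subst hrev; simp [phi, chunkByStepB, prependStep]
  · subst hrev
    have hrun : run ≠ [] := h run (by simp)
    rcases List.eq_nil_or_concat run with h0 | ⟨q, z, hq⟩
    · exact absurd h0 hrun
    · subst hq
      simp only [chunkByStepB]
      by_cases hc : x + 1 = z
      · simp [phi, prependStep, hc]
      · simp [phi, prependStep, hc]

theorem step_ne_nil (rev : List (List Int)) (x : Int) (h : ∀ r ∈ rev, r ≠ []) :
    ∀ r ∈ chunkByStepB rev x, r ≠ [] := by
  intro r hr
  rcases List.eq_nil_or_concat rev with hrev | ⟨rs, run, hrev⟩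
  · subst hrev
    simp [chunkByStepB] at hr
    subst hr; simp
  · subst hrev
    simp only [List.concat_eq_append] at hr h ⊢
    simp only [chunkByStepB, List.getLast?_concat, List.dropLast_concat] at hr
    split_ifs at hr
    · rcases List.mem_append.1 hr with h1 | h2
      · exact h r (List.mem_append.2 (Or.inl h1))
      · simp at h2; subst h2; simp
    · rcases List.mem_append.1 hr with h1 | h2
      · exact h r h1
      · simp at h2; subst h2; simp

theorem phi_foldl (l : List Int) (rev : List (List Int)) (h : ∀ r ∈ rev, r ≠ []) :
    phi (l.foldl chunkByStepB rev) = l.foldl prependStep (phi rev) := by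
  induction l generalizing rev with
  | nil => rfl
  | cons a t ih =>
    simp only [List.foldl_cons]
    rw [ih (chunkByStepB rev a) (step_ne_nil rev a h), phi_step rev a h]

-- Canonical left-to-right run builder (proof-only helper): `consume temp prev l`
-- finishes the open chunk `temp` (whose last element is `prev`) against `l`.
def consume (temp : List Int) (prev : Int) : List Int → List (List Int)
  | [] => [temp]
  | b :: rest => if prev + 1 ≠ b then temp :: consume [b] b rest else consume (temp ++ [b]) b rest

-- Close out A's state: anc ++ [temp].
def finA (st : List Int × List (List Int)) : List (List Int) := st.2 ++ [st.1]

-- A's fold over indices, as a pair fold carrying `prev`.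
theorem foldA_eq_consume (l : List Int) (prev : Int) (temp : List Int) (anc : List (List Int)) :
    finA ((List.range l.length).foldl
        (fun st (i : Nat) => chunkByStepA (prev :: l) st ((i : Int))) (temp, anc))
      = anc ++ consume temp prev l := by
  induction l generalizing prev temp anc with
  | nil => simp [consume, finA]
  | cons b rest ih =>
    have hrange : List.range (rest.length + 1) = 0 :: (List.range rest.length).map Nat.succ :=
      List.range_succ_eq_map
    simp only [List.length_cons, hrange, List.foldl_cons, List.foldl_map]
    have hstep0 : chunkByStepA (prev :: b :: rest) (temp, anc) ((0 : Nat) : Int)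
        = if prev + 1 ≠ b then ([b], anc ++ [temp]) else (temp ++ [b], anc) := by
      simp [chunkByStepA, PySem.List.pyGetD]
      split_ifs <;> rfl
    have hbody : ∀ (st : List Int × List (List Int)) (i : Nat),
        chunkByStepA (prev :: b :: rest) st ((Nat.succ i : Nat) : Int)
          = chunkByStepA (b :: rest) st ((i : Nat) : Int) := by
      intro st i
      have h1 : PySem.List.pyGetD (prev :: b :: rest) ((Nat.succ i : Nat) : Int) 0
          = PySem.List.pyGetD (b :: rest) ((i : Nat) : Int) 0 := by
        rw [PySem.List.pyGetD_natCast, PySem.List.pyGetD_natCast]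
        simp
      have h2 : PySem.List.pyGetD (prev :: b :: rest) (((Nat.succ i : Nat) : Int) + 1) 0
          = PySem.List.pyGetD (b :: rest) (((i : Nat) : Int) + 1) 0 := by
        have e1 : ((Nat.succ i : Nat) : Int) + 1 = ((i + 2 : Nat) : Int) := by push_cast; ring
        have e2 : ((i : Nat) : Int) + 1 = ((i + 1 : Nat) : Int) := by push_cast; ring
        rw [e1, e2, PySem.List.pyGetD_natCast, PySem.List.pyGetD_natCast]
        simp
      simp only [chunkByStepA, h1, h2]
    rw [hstep0]
    by_cases h : prev + 1 ≠ b
    · rw [if_pos h, funext fun st => funext fun i => hbody st i,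
        ih b [b] (anc ++ [temp])]
      simp [consume, if_pos h]
    · rw [if_neg h, funext fun st => funext fun i => hbody st i,
        ih b (temp ++ [b]) anc]
      simp [consume, if_neg h]

-- `consume` with a nonempty open chunk = prepend it to the head of `consume []`.
theorem consume_head (l : List Int) (prev : Int) (temp : List Int) :
    consume temp prev l
      = match consume [] prev l with
        | c :: cs => (temp ++ c) :: cs
        | [] => [] := by
  induction l generalizing prev temp with
  | nil => simp [consume]
  | cons b rest ih =>
    by_cases h : prev + 1 ≠ b
    · simp [consume, if_pos h]
    · simp only [consume, if_neg h, List.nil_append]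
      rw [ih b (temp ++ [b]), ih b [b]]
      cases consume [] b rest with
      | nil => rfl
      | cons c cs => simp

theorem consume_ne_nil (l : List Int) (prev : Int) (temp : List Int) :
    consume temp prev l ≠ [] := by
  induction l generalizing prev temp with
  | nil => simp [consume]
  | cons b rest ih =>
    by_cases h : prev + 1 ≠ b
    · simp [consume, if_pos h]
    · simp only [consume, if_neg h]; exact ih b (temp ++ [b])

-- The backwards pass computes the same runs.
theorem consume_eq_foldr (l : List Int) (x : Int) :
    consume [x] x l = (x :: l).foldr (fun a r => prependStep r a) [] := by
  induction l generalizing x with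
  | nil => simp [consume, prependStep]
  | cons b rest ih =>
    have hrest := ih b
    have hhead := consume_head rest b [b]
    have hne := consume_ne_nil rest b ([] : List Int)
    simp only [List.foldr_cons] at *
    rw [← hrest]
    cases hcc : consume [] b rest with
    | nil => exact absurd hcc hne
    | cons c cs =>
      rw [hcc] at hhead
      by_cases h : x + 1 = b
      · simp only [consume, if_neg (not_not.mpr h)]
        rw [consume_head rest b ([x] ++ [b]), hcc, hhead]
        simp [prependStep, h]
      · simp only [consume, if_pos h]
        rw [hhead]
        simp [prependStep, h]

-- ===== VERDICT (by name: the statement is the Claim_ definition above) =====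
theorem chunkBy_spec : Claim_equal_chunkBy := by
  intro nums _ hpre
  unfold Spec_chunkBy
  match nums with
  | [] => exact absurd rfl hpre
  | x :: l =>
    show (let st := (PySem.List.pyRange 0 (((x :: l).length : Int) - 1) 1).foldl
            (chunkByStepA (x :: l)) ([x], [])
          st.2 ++ [st.1]) = chunkBy_alt (x :: l)
    have hr : PySem.List.pyRange 0 (((x :: l).length : Int) - 1) 1
        = (List.range l.length).map (fun k : Nat => (k : Int)) := by
      have : ((x :: l).length : Int) - 1 = (l.length : Int) := by
        simp [List.length_cons]
      rw [this, PySem.List.pyRange_zero_natCast]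
    rw [hr, List.foldl_map]
    have hA := foldA_eq_consume l x [x] []
    simp only [List.nil_append, finA] at hA
    rw [hA, consume_eq_foldr]
    unfold chunkBy_alt
    have hphi := phi_foldl ((x :: l).reverse) [] (by simp)
    unfold phi at hphi
    rw [hphi, List.foldl_reverse]
    rfl
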